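-- pv_equiv track=rewrite | github.com/mnunezsa95/interview-prep | Python/codewars/28_7kyu_string_reverse_slicing_101.py | reverse_slice
-- ===== SOURCE A (Python) =====
-- def reverse_slice(s):
--     lst = list(s)
--     lst.reverse()
--     reversedStr = "".join(lst)
--     res = []
--     for i in range(len(reversedStr)):
--         res.append(reversedStr[i : len(s)])
--     return res
-- ===== SOURCE B (Python) =====
-- def reverse_slice(s):
--     # One forward pass: acc = c + acc builds each reversed prefix (= suffix of
--     # the reversed string) incrementally; collect them and reverse the list so
--     # the longest (full reversed string) comes first. No slicing, no per-item copy of s.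
--     res = []
--     acc = ""
--     for c in s:
--         acc = c + acc
--         res.append(acc)
--     res.reverse()
--     return res
-- ===== Notes on version B (the rewrite author's own statement) =====
-- stated objective: alternative
-- what changed: Replaced n independent slices of the reversed string by a single forward pass that grows each suffix incrementally (acc = c + acc) and reverses the collected list once; no explicit string reversal or slicing.
import Mathlib
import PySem

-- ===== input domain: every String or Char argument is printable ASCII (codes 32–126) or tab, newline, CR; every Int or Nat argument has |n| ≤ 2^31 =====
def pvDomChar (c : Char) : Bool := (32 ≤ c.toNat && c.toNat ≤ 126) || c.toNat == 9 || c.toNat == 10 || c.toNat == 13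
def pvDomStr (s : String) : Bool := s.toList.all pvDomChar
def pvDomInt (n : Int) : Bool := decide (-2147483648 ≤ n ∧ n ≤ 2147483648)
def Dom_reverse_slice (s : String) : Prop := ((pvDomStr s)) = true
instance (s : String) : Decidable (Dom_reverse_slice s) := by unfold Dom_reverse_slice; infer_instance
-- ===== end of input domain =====

-- B builds each suffix of the reversed string incrementally in one forward pass
-- instead of taking n independent slices of the reversed string (objective: alternative).

-- ===== PORT A =====
def reverse_slice (s : String) : List String :=
  let lst := s.toList
  let lst := lst.reverse
  let reversedStr := lst            -- "".join(lst): kept as the char list; wrapped by String.ofList at each use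
  (PySem.List.pyRange 0 (reversedStr.length : Int) 1).foldl
    (fun res i =>
      res ++ [String.ofList (PySem.List.slice reversedStr (some i) (some (s.toList.length : Int)))])
    []

-- ===== PORT B =====
def reverse_slice_alt (s : String) : List String :=
  let p := s.toList.foldl
    (fun (st : List String × List Char) c =>
      (st.1 ++ [String.ofList (c :: st.2)], c :: st.2))   -- acc = c + acc; list appended then acc updated
    ([], [])
  p.1.reverse

-- ===== PRECONDITION & SPEC =====
def Spec_reverse_slice (s : String) (out : List String) : Prop := out = reverse_slice_alt s
instance (s : String) (out : List String) : Decidable (Spec_reverse_slice s out) := by unfold Spec_reverse_slice; infer_instance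

-- ===== CLAIM (what is proved, stated in full; the proofs are below) =====
def Claim_equal_reverse_slice : Prop := ∀ (s : String), Dom_reverse_slice s → Spec_reverse_slice s (reverse_slice s)

-- ===== LEMMAS AND PROOFS =====

-- A's loop as a map over range.
theorem pv_foldl_append {α β : Type} (g : α → β) :
    ∀ (l : List α) (init : List β),
      l.foldl (fun res i => res ++ [g i]) init = init ++ l.map g := by
  intro l
  induction l with
  | nil => intro init; simp
  | cons x t ih => intro init; simp [List.foldl, ih]

theorem pv_A_closed (s : String) :
    reverse_slice s
      = (List.range s.toList.length).map
          (fun k => String.ofList (s.toList.reverse.drop k)) := by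
  unfold reverse_slice
  dsimp only
  rw [List.length_reverse, PySem.List.pyRange_one 0 (s.toList.length : Int)]
  rw [pv_foldl_append]
  simp only [List.map_map, List.nil_append]
  refine List.map_congr_left ?_
  intro k hk
  rw [List.mem_range] at hk
  simp only [Function.comp, zero_add]
  rw [PySem.List.slice_natCast]
  congr 1
  have : (s.toList.reverse.drop k).length = s.toList.length - k := by simp
  exact List.take_of_length_le (by omega)

-- B's loop invariant.
theorem pv_B_invariant (l : List Char) :
    ∀ (res : List String) (acc : List Char),
      (l.foldl (fun (st : List String × List Char) c =>
          (st.1 ++ [String.ofList (c :: st.2)], c :: st.2)) (res, acc)).1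
        = res ++ (List.range l.length).map
            (fun j => String.ofList ((l.take (j + 1)).reverse ++ acc)) := by
  induction l with
  | nil => intro res acc; simp
  | cons c t ih =>
    intro res acc
    simp only [List.foldl_cons, ih, List.length_cons, List.range_succ_eq_map,
      List.map_cons, List.map_map]
    simp [Function.comp, List.append_assoc]

theorem pv_B_closed (s : String) :
    reverse_slice_alt s
      = ((List.range s.toList.length).map
          (fun j => String.ofList ((s.toList.take (j + 1)).reverse))).reverse := by
  unfold reverse_slice_alt
  dsimp only
  rw [pv_B_invariant]
  simp

theorem reverse_slice_eq (s : String) : reverse_slice s = reverse_slice_alt s := by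
  rw [pv_A_closed, pv_B_closed]
  apply List.ext_getElem
  · simp
  · intro k h1 h2
    simp only [List.length_map, List.length_range] at h1
    rw [List.getElem_reverse]
    simp only [List.getElem_map, List.getElem_range]
    congr 1
    rw [List.drop_reverse]
    congr 2
    simp only [List.length_map, List.length_range]
    omega

-- ===== VERDICT (by name: the statement is the Claim_ definition above) =====
theorem reverse_slice_spec : Claim_equal_reverse_slice := by
  intro s _
  exact reverse_slice_eq s
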